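-- pv_equiv track=rewrite | github.com/ldmud/python-dbus | ldmud_dbus/__init__.py | skip_signature
-- ===== SOURCE A (Python) =====
-- def skip_signature(signature, idx):
--     """
--     Skip a single element in the signature and return
--     the index of the next element.
--     """
--     breaks = []
--     while True:
--         if signature[idx] in "ybnqiuxtdsogv":
--             idx += 1
--         elif signature[idx] == 'a':
--             idx += 1
--             if idx >= len(signature):
--                 raise ValueError("unexpected end in signature")
--             continue
--         elif signature[idx] == '(':
--             breaks.append(')')
--             idx += 1
--         elif signature[idx] == '{':
--             breaks.append('}')
--             idx += 1
--         elif breaks and signature[idx] == breaks[-1]: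
--             breaks.pop()
--             idx += 1
--         else:
--             raise ValueError("unsupported type '%s'" % (signature[idx],))
--
--         if not breaks:
--             return idx
--         if idx >= len(signature):
--             raise ValueError("unexpected end in signature")
-- ===== SOURCE B (Python) =====
-- def skip_signature(signature, idx):
--     """
--     Skip a single element in the signature and return
--     the index of the next element.
--     Recursive-descent version: arrays are consumed by a prefix loop,
--     containers by recursing on each member until the closing bracket.
--     """
--     while signature[idx] == 'a':
--         idx += 1
--         if idx >= len(signature):
--             raise ValueError("unexpected end in signature")
--     c = signature[idx]
--     if c in "ybnqiuxtdsogv":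
--         return idx + 1
--     if c == '(' or c == '{':
--         close = ')' if c == '(' else '}'
--         idx += 1
--         while True:
--             if idx >= len(signature):
--                 raise ValueError("unexpected end in signature")
--             if signature[idx] == close:
--                 return idx + 1
--             idx = skip_signature(signature, idx)
--     raise ValueError("unsupported type '%s'" % (c,))
-- ===== Notes on version B (the rewrite author's own statement) =====
-- stated objective: alternative
-- what changed: A's single while-loop over an explicit stack of expected closing brackets is replaced by a recursive-descent skipper: an iterative array-prefix loop, then either a basic type or a container whose members are skipped by recursion until the matching closer, so the stack disappears into the call structure.
-- outside the precondition, e.g. on skip_signature('(a)', 0): A returns 3, B raises ValueError; on skip_signature('{qa}', 0): A returns 4, B raises ValueError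
import Mathlib
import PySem

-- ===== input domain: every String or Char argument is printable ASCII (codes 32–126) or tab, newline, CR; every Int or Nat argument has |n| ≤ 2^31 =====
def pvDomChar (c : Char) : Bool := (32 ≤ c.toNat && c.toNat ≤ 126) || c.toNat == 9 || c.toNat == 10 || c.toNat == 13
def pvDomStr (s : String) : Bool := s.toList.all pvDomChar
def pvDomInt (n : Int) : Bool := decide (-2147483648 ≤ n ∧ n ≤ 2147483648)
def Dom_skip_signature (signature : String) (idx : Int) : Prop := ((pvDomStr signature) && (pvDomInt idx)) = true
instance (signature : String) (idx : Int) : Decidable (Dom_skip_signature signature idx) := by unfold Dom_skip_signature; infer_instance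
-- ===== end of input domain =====

-- B is a recursive-descent skipper (array prefix loop + recursion on container members)
-- instead of A's single loop over an explicit stack of expected closing brackets; return value only
-- (neither version mutates its arguments). Objective: alternative structure, similar cost.

-- shared character class "ybnqiuxtdsogv" (basic dbus types)
def isBasic (c : Char) : Bool :=
  c = 'y' || c = 'b' || c = 'n' || c = 'q' || c = 'i' || c = 'u' || c = 'x' ||
  c = 't' || c = 'd' || c = 's' || c = 'o' || c = 'g' || c = 'v'

-- ===== PORT A =====
-- A's while-loop with the `breaks` stack of expected closers; `none` = the Python raises
-- (IndexError on the first read, ValueError otherwise).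
def skipA (l : List Char) (n : Int) (closes : List Char) (idx : Int) : Option Int :=
  match PySem.List.pyGet? l idx with
  | none => none
  | some c =>
    if isBasic c then
      (if closes = [] then some (idx + 1)
       else if _h : idx + 1 ≥ n then none else skipA l n closes (idx + 1))
    else if c = 'a' then
      (if _h : idx + 1 ≥ n then none else skipA l n closes (idx + 1))
    else if c = '(' then
      (if closes ++ [')'] = [] then some (idx + 1)
       else if _h : idx + 1 ≥ n then none else skipA l n (closes ++ [')']) (idx + 1))
    else if c = '{' then
      (if closes ++ ['}'] = [] then some (idx + 1)
       else if _h : idx + 1 ≥ n then none else skipA l n (closes ++ ['}']) (idx + 1))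
    else if closes.getLast? = some c then
      (if closes.dropLast = [] then some (idx + 1)
       else if _h : idx + 1 ≥ n then none else skipA l n closes.dropLast (idx + 1))
    else none
termination_by (n - idx).toNat
decreasing_by all_goals omega

def skip_signature (signature : String) (idx : Int) : Int :=
  (skipA signature.toList (signature.toList.length : Int) [] idx).getD 0

-- ===== PORT B =====
-- recursive descent: consume 'a' prefixes, then a basic type or a container whose members are
-- skipped recursively until the matching closer; `none` = the Python raises.
-- Results carry the bound idx < r ≤ n used for termination.

theorem pvGet_bounds {l : List Char} {idx : Int} {c : Char}
    (h : PySem.List.pyGet? l idx = some c) : -(l.length : Int) ≤ idx ∧ idx < l.length := by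
  by_contra hcon
  have : PySem.List.pyGet? l idx = none := by
    rw [PySem.List.pyGet?_eq_none_iff]
    simp [PySem.Raise.InRange]; omega
  simp [this] at h

mutual
def skipB (l : List Char) (idx : Int) : Option {r : Int // idx < r ∧ r ≤ l.length} :=
  match h : PySem.List.pyGet? l idx with
  | none => none
  | some c =>
    if c = 'a' then
      (if _h2 : idx + 1 ≥ (l.length : Int) then none
       else match skipB l (idx + 1) with
            | none => none
            | some r => some ⟨r.1, by have := r.2; omega⟩)
    else if isBasic c then some ⟨idx + 1, by have := (pvGet_bounds h).2; omega⟩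
    else if c = '(' then
      (match seqB l ')' (idx + 1) with
       | none => none
       | some r => some ⟨r.1, by have := r.2; omega⟩)
    else if c = '{' then
      (match seqB l '}' (idx + 1) with
       | none => none
       | some r => some ⟨r.1, by have := r.2; omega⟩)
    else none
  termination_by 2 * (((l.length : Int) - idx).toNat) + 0
  decreasing_by all_goals ((try have := (pvGet_bounds h).2); simp_wf; (try omega))
def seqB (l : List Char) (close : Char) (idx : Int) : Option {r : Int // idx < r ∧ r ≤ l.length} :=
  if _h : idx ≥ (l.length : Int) then none
  else
    match PySem.List.pyGet? l idx with
    | none => none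
    | some c =>
      if c = close then some ⟨idx + 1, by omega⟩
      else
        match skipB l idx with
        | none => none
        | some r =>
          match seqB l close r.1 with
          | none => none
          | some r2 => some ⟨r2.1, lt_trans r.2.1 r2.2.1, r2.2.2⟩
  termination_by 2 * (((l.length : Int) - idx).toNat) + 1
  decreasing_by all_goals ((try have := r.2); simp_wf; (try omega))
end

def skip_signature_alt (signature : String) (idx : Int) : Int :=
  match skipB signature.toList idx with
  | none => 0
  | some r => r.1

-- ===== PRECONDITION & SPEC =====
-- Grammar of one complete dbus type, as a consumed-length parser over the characters:
-- one :== 'a'* (basic | '(' one* ')' | '{' one* '}').  The Nat argument is plain fuel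
-- (any value ≥ 2·length + 2 is enough; Pre_ passes that bound); it only makes the
-- recursion structural so that the precondition evaluates by `decide`.
mutual
def parseOne : Nat → List Char → Option Nat
  | 0, _ => none
  | _ + 1, [] => none
  | f + 1, c :: r =>
    if c = 'a' then (parseOne f r).map (· + 1)
    else if isBasic c then some 1
    else if c = '(' then (parseSeq f ')' r).map (· + 1)
    else if c = '{' then (parseSeq f '}' r).map (· + 1)
    else none
def parseSeq : Nat → Char → List Char → Option Nat
  | 0, _, _ => none
  | _ + 1, _, [] => none
  | f + 1, close, c :: r =>
    if c = close then some 1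
    else
      match parseOne f (c :: r) with
      | none => none
      | some k1 => (parseSeq f close ((c :: r).drop k1)).map (k1 + ·)
end

-- The characters A and B read from raw position idx on: Python's negative indices read
-- l[len+idx], and both programs stop at raw position len, so the stream of characters a
-- run can see is a suffix of l ++ l.
def pvStream (l : List Char) (idx : Int) : List Char :=
  (l ++ l).drop (idx + l.length).toNat

-- Pre_ = idx is a valid Python index into the signature and a complete single type starts
-- there.  This excludes every input on which A raises (IndexError / ValueError), and also the
-- signatures in which an array marker 'a' is directly followed by the enclosing container's
-- closing bracket: there A accidentally accepts the closer as the array's element type and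
-- returns, while B (naturally) raises ValueError("unsupported type") — see claim.json cites.
def Pre_skip_signature (signature : String) (idx : Int) : Prop :=
  (-(signature.toList.length : Int) ≤ idx ∧ idx < signature.toList.length) ∧
    (parseOne (2 * (pvStream signature.toList idx).length + 2)
        (pvStream signature.toList idx)).isSome = true
instance (signature : String) (idx : Int) : Decidable (Pre_skip_signature signature idx) := by
  unfold Pre_skip_signature; infer_instance

def pvWitness_skip_signature : String × Int := ("a(iqs)", 0)

def Spec_skip_signature (signature : String) (idx : Int) (out : Int) : Prop := out = skip_signature_alt signature idx
instance (signature : String) (idx : Int) (out : Int) : Decidable (Spec_skip_signature signature idx out) := by unfold Spec_skip_signature; infer_instance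

-- ===== CLAIM (what is proved, stated in full; the proofs are below) =====
def Claim_equal_skip_signature : Prop := ∀ (signature : String) (idx : Int), Dom_skip_signature signature idx → Pre_skip_signature signature idx → Spec_skip_signature signature idx (skip_signature signature idx)

-- ===== LEMMAS AND PROOFS =====

-- A's loop re-expressed over the character stream: consumed-length version of skipA.
def alist (closes : List Char) : List Char → Option Nat
  | [] => none
  | c :: s =>
    if isBasic c then
      (if closes = [] then some 1 else (alist closes s).map (· + 1))
    else if c = 'a' then (alist closes s).map (· + 1)
    else if c = '(' then (alist (closes ++ [')']) s).map (· + 1)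
    else if c = '{' then (alist (closes ++ ['}']) s).map (· + 1)
    else if closes.getLast? = some c then
      (if closes.dropLast = [] then some 1 else (alist closes.dropLast s).map (· + 1))
    else none

-- what A computes after one complete element of length k: done if no closer is pending,
-- else continue the loop on the rest of the stream
def resume (closes : List Char) (k : Nat) (s : List Char) : Option Nat :=
  if closes = [] then some k else (alist closes (s.drop k)).map (· + k)

def closersOK (closes : List Char) : Prop := ∀ x ∈ closes, x = ')' ∨ x = '}'

-- ---- stream bookkeeping ----
theorem stream_head (l : List Char) (idx : Int) (h : -(l.length : Int) ≤ idx) :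
    PySem.List.pyGet? l idx = (pvStream l idx).head? := by
  unfold pvStream
  rw [List.head?_drop]
  by_cases hpos : 0 ≤ idx
  · rw [PySem.List.pyGet?_of_nonneg l hpos]
    have h1 : (idx + l.length).toNat = l.length + idx.toNat := by omega
    rw [h1, List.getElem?_append_right (by omega)]
    congr 1; omega
  · have hneg : idx < 0 := by omega
    have hk : idx = -(((-idx).toNat : Nat) : Int) := by omega
    rw [hk, PySem.List.pyGet?_neg_natCast l (-idx).toNat (by omega) (by omega)]
    have h1 : (-(((-idx).toNat : Nat) : Int) + l.length).toNat = l.length - (-idx).toNat := by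
      omega
    rw [h1, List.getElem?_append_left (by omega)]

theorem stream_tail (l : List Char) (idx : Int) (h : -(l.length : Int) ≤ idx) :
    pvStream l (idx + 1) = (pvStream l idx).tail := by
  unfold pvStream
  rw [List.tail_drop]
  congr 1; omega

theorem stream_len (l : List Char) (idx : Int) (h : -(l.length : Int) ≤ idx) :
    (pvStream l idx).length = ((l.length : Int) - idx).toNat := by
  unfold pvStream
  simp only [List.length_drop, List.length_append]
  omega

theorem stream_drop (l : List Char) (idx : Int) (k : Nat) (h : -(l.length : Int) ≤ idx) :
    pvStream l (idx + k) = (pvStream l idx).drop k := by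
  unfold pvStream
  rw [List.drop_drop]
  congr 1; omega

-- ---- a successful parse consumes at least one character ----
theorem parseOne_pos {f : Nat} {s : List Char} {k : Nat} (h : parseOne f s = some k) : 1 ≤ k := by
  match f, s with
  | 0, _ => simp [parseOne] at h
  | _ + 1, [] => simp [parseOne] at h
  | f + 1, c :: r =>
    simp only [parseOne] at h
    split_ifs at h <;>
      first
        | (obtain ⟨a, -, rfl⟩ := Option.map_eq_some_iff.mp h; omega)
        | (cases h; omega)

-- ---- main lemma 1: A's loop on the stream, against the grammar ----
-- after parsing one element (k chars), A's loop is exactly `resume`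
theorem alist_parse :
    ∀ m : Nat, ∀ s : List Char, s.length ≤ m →
      (∀ f k closes, 2 * s.length + 1 ≤ f → parseOne f s = some k → closersOK closes →
        alist closes s = resume closes k s) ∧
      (∀ f close k closes, 2 * s.length + 2 ≤ f → parseSeq f close s = some k →
        (close = ')' ∨ close = '}') → closersOK closes →
        alist (closes ++ [close]) s = resume closes k s) := by
  intro m
  induction m with
  | zero =>
    intro s hs
    have hnil : s = [] := List.length_eq_zero_iff.mp (by omega)
    subst hnil
    constructor
    · intro f k closes hf hp
      match f with
      | f' + 1 => simp [parseOne] at hp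
    · intro f close k closes hf hp
      match f with
      | f' + 1 => simp [parseSeq] at hp
  | succ m ih =>
    intro s hs
    cases s with
    | nil =>
      constructor
      · intro f k closes hf hp
        match f with
        | f' + 1 => simp [parseOne] at hp
      · intro f close k closes hf hp
        match f with
        | f' + 1 => simp [parseSeq] at hp
    | cons c r =>
      have hr : r.length ≤ m := by
        simp only [List.length_cons] at hs; omega
      have hM1 : ∀ f k closes, 2 * (c :: r).length + 1 ≤ f → parseOne f (c :: r) = some k →
          closersOK closes → alist closes (c :: r) = resume closes k (c :: r) := by
        intro f k closes hf hp hok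
        obtain ⟨f', rfl⟩ : ∃ f', f = f' + 1 := ⟨f - 1, by omega⟩
        simp only [List.length_cons] at hf
        simp only [parseOne] at hp
        by_cases hac : c = 'a'
        · rw [if_pos hac] at hp
          obtain ⟨k', hk', rfl⟩ := Option.map_eq_some_iff.mp hp
          subst hac
          have e1 := (ih r hr).1 f' k' closes (by omega) hk' hok
          simp only [alist, show isBasic 'a' = false by decide, Bool.false_eq_true,
            if_false, if_pos rfl, e1]
          unfold resume
          by_cases hcl : closes = []
          · simp [hcl]
          · simp only [hcl, if_false, List.drop_succ_cons]
            cases alist closes (r.drop k') <;> simp <;> omega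
        rw [if_neg hac] at hp
        by_cases hb : isBasic c
        · rw [if_pos hb] at hp
          cases hp
          simp only [alist, if_pos hb]
          unfold resume
          by_cases hcl : closes = []
          · simp [hcl]
          · simp only [hcl, if_false, List.drop_succ_cons, List.drop_zero]
        rw [if_neg hb] at hp
        by_cases hpar : c = '('
        · rw [if_pos hpar] at hp
          obtain ⟨k2, hk2, rfl⟩ := Option.map_eq_some_iff.mp hp
          subst hpar
          have e1 := (ih r hr).2 f' ')' k2 closes (by omega) hk2 (Or.inl rfl) hok
          simp only [alist, show isBasic '(' = false by decide, Bool.false_eq_true, if_false,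
            show ('(' = 'a') = False by simp, if_pos rfl, e1]
          unfold resume
          by_cases hcl : closes = []
          · simp [hcl]
          · simp only [hcl, if_false, List.drop_succ_cons]
            cases alist closes (r.drop k2) <;> simp <;> omega
        rw [if_neg hpar] at hp
        by_cases hbr : c = '{'
        · rw [if_pos hbr] at hp
          obtain ⟨k2, hk2, rfl⟩ := Option.map_eq_some_iff.mp hp
          subst hbr
          have e1 := (ih r hr).2 f' '}' k2 closes (by omega) hk2 (Or.inr rfl) hok
          simp only [alist, show isBasic '{' = false by decide, Bool.false_eq_true, if_false,
            show ('{' = 'a') = False by simp, show ('{' = '(') = False by simp, if_pos rfl, e1]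
          unfold resume
          by_cases hcl : closes = []
          · simp [hcl]
          · simp only [hcl, if_false, List.drop_succ_cons]
            cases alist closes (r.drop k2) <;> simp <;> omega
        rw [if_neg hbr] at hp
        cases hp
      refine ⟨hM1, ?_⟩
      intro f close k closes hf hp hclose hok
      obtain ⟨f', rfl⟩ : ∃ f', f = f' + 1 := ⟨f - 1, by omega⟩
      simp only [List.length_cons] at hf
      simp only [parseSeq] at hp
      have hbc : isBasic close = false := by
        rcases hclose with h | h <;> subst h <;> decide
      by_cases hc : c = close
      · rw [if_pos hc] at hp
        cases hp
        subst hc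
        have h1 : (isBasic c) = false := hbc
        have h2 : c ≠ 'a' := by rcases hclose with h | h <;> subst h <;> decide
        have h3 : c ≠ '(' := by rcases hclose with h | h <;> subst h <;> decide
        have h4 : c ≠ '{' := by rcases hclose with h | h <;> subst h <;> decide
        simp only [alist, h1, Bool.false_eq_true, if_false, if_neg h2, if_neg h3, if_neg h4,
          List.getLast?_concat, if_pos rfl, List.dropLast_concat]
        unfold resume
        by_cases hcl : closes = []
        · simp [hcl]
        · simp [hcl]
      · rw [if_neg hc] at hp
        cases hp1 : parseOne f' (c :: r) with
        | none => rw [hp1] at hp; cases hp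
        | some k1 =>
          rw [hp1] at hp
          obtain ⟨k2, hk2, rfl⟩ := Option.map_eq_some_iff.mp hp
          have hk1pos : 1 ≤ k1 := parseOne_pos hp1
          have hok' : closersOK (closes ++ [close]) := by
            intro x hx
            rcases List.mem_append.mp hx with h | h
            · exact hok x h
            · simp at h; subst h; exact hclose
          have e1 := hM1 f' k1 (closes ++ [close]) (by simp; omega) hp1 hok'
          rw [e1]
          unfold resume
          rw [if_neg (by simp : ¬(closes ++ [close] = []))]
          have hlen2 : ((c :: r).drop k1).length ≤ m := by
            simp only [List.length_drop, List.length_cons]; omega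
          have e2 := (ih ((c :: r).drop k1) hlen2).2 f' close k2 closes
            (by simp only [List.length_drop, List.length_cons]; omega) hk2 hclose hok
          rw [e2]
          unfold resume
          by_cases hcl : closes = []
          · simp [hcl, Nat.add_comm]
          · simp only [hcl, if_false, List.drop_drop]
            cases alist closes ((c :: r).drop (k1 + k2)) <;> simp <;> omega

-- ---- main lemma 2: A's port equals its stream version ----
theorem skipA_empty (l : List Char) (idx : Int) (closes : List Char)
    (hge : -(l.length : Int) ≤ idx) (hbig : (l.length : Int) ≤ idx) :
    skipA l (l.length : Int) closes idx
      = (alist closes (pvStream l idx)).map (fun k : Nat => idx + (k : Int)) := by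
  have hS : pvStream l idx = [] := by
    have h1 := stream_len l idx hge
    exact List.length_eq_zero_iff.mp (by omega)
  have hg : PySem.List.pyGet? l idx = none := by
    rw [stream_head l idx hge, hS]; rfl
  rw [skipA.eq_def, hg, hS]
  simp [alist]

theorem stepA (l : List Char) (idx : Int) (closes' : List Char) (m : Nat)
    (hge : -(l.length : Int) ≤ idx) (hlt : idx < l.length)
    (hm : ((l.length : Int) - idx).toNat ≤ m + 1)
    (ih : ∀ idx' closes'', -(l.length : Int) ≤ idx' → ((l.length : Int) - idx').toNat ≤ m →
      skipA l (l.length : Int) closes'' idx'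
        = (alist closes'' (pvStream l idx')).map (fun k : Nat => idx' + (k : Int))) :
    (if _h : idx + 1 ≥ (l.length : Int) then none
     else skipA l (l.length : Int) closes' (idx + 1))
      = ((alist closes' (pvStream l (idx + 1))).map (· + 1)).map
          (fun k : Nat => idx + (k : Int)) := by
  by_cases hend : idx + 1 ≥ (l.length : Int)
  · have hS : pvStream l (idx + 1) = [] := by
      have h1 := stream_len l (idx + 1) (by omega)
      exact List.length_eq_zero_iff.mp (by omega)
    rw [dif_pos hend, hS]
    simp [alist]
  · rw [dif_neg hend, ih (idx + 1) closes' (by omega) (by omega)]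
    cases ha : alist closes' (pvStream l (idx + 1)) <;> simp [ha] <;> push_cast <;> ring

theorem skipA_alist :
    ∀ m : Nat, ∀ l : List Char, ∀ idx : Int, ∀ closes : List Char,
      -(l.length : Int) ≤ idx → ((l.length : Int) - idx).toNat ≤ m →
      skipA l (l.length : Int) closes idx
        = (alist closes (pvStream l idx)).map (fun k : Nat => idx + (k : Int)) := by
  intro m
  induction m with
  | zero =>
    intro l idx closes hge hm
    exact skipA_empty l idx closes hge (by omega)
  | succ m ih =>
    intro l idx closes hge hm
    by_cases hbig : (l.length : Int) ≤ idx
    · exact skipA_empty l idx closes hge hbig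
    push_neg at hbig
    have hlen := stream_len l idx hge
    cases hS : pvStream l idx with
    | nil => rw [hS] at hlen; simp at hlen; omega
    | cons c s' =>
      have hg : PySem.List.pyGet? l idx = some c := by
        rw [stream_head l idx hge, hS]; rfl
      have htail : pvStream l (idx + 1) = s' := by
        rw [stream_tail l idx hge, hS]; rfl
      have ih' : ∀ idx' closes'', -(l.length : Int) ≤ idx' →
          ((l.length : Int) - idx').toNat ≤ m →
          skipA l (l.length : Int) closes'' idx'
            = (alist closes'' (pvStream l idx')).map (fun k : Nat => idx' + (k : Int)) :=
        fun idx' closes'' h1 h2 => ih l idx' closes'' h1 h2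
      rw [skipA.eq_def, hg]
      simp only [alist]
      by_cases hb : isBasic c
      · rw [if_pos hb, if_pos hb, ← htail]
        by_cases hcl : closes = []
        · simp [hcl]
        · rw [if_neg hcl, if_neg hcl]
          exact stepA l idx closes m hge hbig hm ih'
      rw [if_neg hb, if_neg hb]
      by_cases ha : c = 'a'
      · rw [if_pos ha, if_pos ha]
        by_cases hend : idx + 1 ≥ (l.length : Int)
        · have hs' : s' = [] := by
            have h1 := stream_len l (idx + 1) (by omega)
            rw [htail] at h1
            exact List.length_eq_zero_iff.mp (by omega)
          rw [dif_pos hend, hs']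
          simp [alist]
        · rw [dif_neg hend, ih l (idx + 1) closes (by omega) (by omega), htail]
          cases h2 : alist closes s' <;> simp [h2] <;> push_cast <;> ring
      rw [if_neg ha, if_neg ha]
      by_cases hp : c = '('
      · rw [if_pos hp, if_pos hp, ← htail, if_neg (by simp : ¬(closes ++ [')'] = []))]
        exact stepA l idx (closes ++ [')']) m hge hbig hm ih'
      rw [if_neg hp, if_neg hp]
      by_cases hq : c = '{'
      · rw [if_pos hq, if_pos hq, ← htail, if_neg (by simp : ¬(closes ++ ['}'] = []))]
        exact stepA l idx (closes ++ ['}']) m hge hbig hm ih'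
      rw [if_neg hq, if_neg hq]
      by_cases hlast : closes.getLast? = some c
      · rw [if_pos hlast, if_pos hlast, ← htail]
        by_cases hdl : closes.dropLast = []
        · simp [hdl]
        · rw [if_neg hdl, if_neg hdl]
          exact stepA l idx closes.dropLast m hge hbig hm ih'
      · rw [if_neg hlast, if_neg hlast]
        rfl

theorem skipB_parse_empty (l : List Char) (idx : Int)
    (hge : -(l.length : Int) ≤ idx) (hbig : (l.length : Int) ≤ idx) :
    (∀ f, 2 * (pvStream l idx).length + 1 ≤ f →
      (skipB l idx).map Subtype.val
        = (parseOne f (pvStream l idx)).map (fun k : Nat => idx + (k : Int))) ∧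
    (∀ f close, 2 * (pvStream l idx).length + 2 ≤ f →
      (seqB l close idx).map Subtype.val
        = (parseSeq f close (pvStream l idx)).map (fun k : Nat => idx + (k : Int))) := by
  have hS : pvStream l idx = [] := by
    have h1 := stream_len l idx hge
    exact List.length_eq_zero_iff.mp (by omega)
  have hg : PySem.List.pyGet? l idx = none := by
    rw [stream_head l idx hge, hS]; rfl
  constructor
  · intro f hf
    rw [skipB.eq_def, hS]
    split
    · cases f <;> simp [parseOne]
    · next c' heq => rw [hg] at heq; cases heq
  · intro f close hf
    rw [seqB.eq_def, dif_pos (by omega : idx ≥ (l.length : Int)), hS]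
    cases f <;> simp [parseSeq]

-- ---- main lemma 3: B's port against the grammar ----
theorem skipB_parse :
    ∀ m : Nat, ∀ l : List Char, ∀ idx : Int,
      -(l.length : Int) ≤ idx → ((l.length : Int) - idx).toNat ≤ m →
      (∀ f, 2 * (pvStream l idx).length + 1 ≤ f →
        (skipB l idx).map Subtype.val
          = (parseOne f (pvStream l idx)).map (fun k : Nat => idx + (k : Int))) ∧
      (∀ f close, 2 * (pvStream l idx).length + 2 ≤ f →
        (seqB l close idx).map Subtype.val
          = (parseSeq f close (pvStream l idx)).map (fun k : Nat => idx + (k : Int))) := by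
  intro m
  induction m with
  | zero =>
    intro l idx hge hm
    exact skipB_parse_empty l idx hge (by omega)
  | succ m ih =>
    intro l idx hge hm
    by_cases hbig : (l.length : Int) ≤ idx
    · exact skipB_parse_empty l idx hge hbig
    push_neg at hbig
    have hlen := stream_len l idx hge
    cases hS : pvStream l idx with
    | nil => rw [hS] at hlen; simp at hlen; omega
    | cons c s' =>
      have hg : PySem.List.pyGet? l idx = some c := by
        rw [stream_head l idx hge, hS]; rfl
      have htail : pvStream l (idx + 1) = s' := by
        rw [stream_tail l idx hge, hS]; rfl
      have hs'len : s'.length + 1 = (pvStream l idx).length := by rw [hS]; rfl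
      have hA : ∀ f, 2 * (c :: s').length + 1 ≤ f →
          (skipB l idx).map Subtype.val
            = (parseOne f (c :: s')).map (fun k : Nat => idx + (k : Int)) := by
        intro f hf
        simp only [List.length_cons] at hf
        obtain ⟨f', rfl⟩ : ∃ f', f = f' + 1 := ⟨f - 1, by omega⟩
        rw [skipB.eq_def]
        split
        · next heq => rw [hg] at heq; cases heq
        next c' heq =>
          rw [hg] at heq
          injection heq with heq; subst heq
          simp only [parseOne]
          by_cases hac : c = 'a'
          · rw [if_pos hac, if_pos hac]
            by_cases hend : idx + 1 ≥ (l.length : Int)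
            · have hs' : s' = [] := by
                have h1 := stream_len l (idx + 1) (by omega)
                rw [htail] at h1
                exact List.length_eq_zero_iff.mp (by omega)
              rw [dif_pos hend, hs']
              cases f' <;> simp [parseOne]
            · rw [dif_neg hend]
              have IH := (ih l (idx + 1) (by omega) (by omega)).1 f'
                (by rw [htail]; omega)
              rw [htail] at IH
              cases hsb : skipB l (idx + 1) <;> cases hpo : parseOne f' s' <;>
                rw [hsb, hpo] at IH <;> simp at IH <;> simp [hpo]
              · omega
          rw [if_neg hac, if_neg hac]
          by_cases hb : isBasic c
          · rw [if_pos hb, if_pos hb]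
            simp
          rw [if_neg hb, if_neg hb]
          by_cases hpar : c = '('
          · rw [if_pos hpar, if_pos hpar]
            have IH := (ih l (idx + 1) (by omega) (by omega)).2 f' ')'
              (by rw [htail]; omega)
            rw [htail] at IH
            cases hsb : seqB l ')' (idx + 1) <;> cases hpo : parseSeq f' ')' s' <;>
              rw [hsb, hpo] at IH <;> simp at IH <;> simp [hpo]
            · omega
          rw [if_neg hpar, if_neg hpar]
          by_cases hbr : c = '{'
          · rw [if_pos hbr, if_pos hbr]
            have IH := (ih l (idx + 1) (by omega) (by omega)).2 f' '}'
              (by rw [htail]; omega)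
            rw [htail] at IH
            cases hsb : seqB l '}' (idx + 1) <;> cases hpo : parseSeq f' '}' s' <;>
              rw [hsb, hpo] at IH <;> simp at IH <;> simp [hpo]
            · omega
          rw [if_neg hbr, if_neg hbr]
          rfl
      refine ⟨hA, ?_⟩
      intro f close hf
      simp only [List.length_cons] at hf
      obtain ⟨f', rfl⟩ : ∃ f', f = f' + 1 := ⟨f - 1, by omega⟩
      rw [seqB.eq_def, dif_neg (by omega : ¬(idx ≥ (l.length : Int))), hg]
      simp only [parseSeq]
      by_cases hc : c = close
      · rw [if_pos hc, if_pos hc]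
        simp
      rw [if_neg hc, if_neg hc]
      have hA' := hA f' (by simp only [List.length_cons]; omega)
      cases hsb : skipB l idx <;> cases hpo : parseOne f' (c :: s') <;>
        rw [hsb, hpo] at hA' <;> simp at hA'
      · simp
      next r k1 =>
        have hk1pos : 1 ≤ k1 := parseOne_pos hpo
        have hdrop : pvStream l (idx + (k1 : Int)) = (c :: s').drop k1 := by
          rw [stream_drop l idx k1 hge, hS]
        have hmeas : (((l.length : Int)) - (idx + (k1 : Int))).toNat ≤ m := by omega
        have IH2 := (ih l (idx + (k1 : Int)) (by omega) hmeas).2 f' close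
          (by rw [hdrop]; simp only [List.length_drop, List.length_cons]; omega)
        rw [hdrop] at IH2
        rw [show idx + (k1 : Int) = r.1 from hA'.symm] at IH2
        cases hs2 : seqB l close r.1 with
        | none =>
          cases hp2 : parseSeq f' close ((c :: s').drop k1) with
          | none => simp [hs2, hp2]
          | some k2 => rw [hs2, hp2] at IH2; simp at IH2
        | some r2 =>
          cases hp2 : parseSeq f' close ((c :: s').drop k1) with
          | none => rw [hs2, hp2] at IH2; simp at IH2
          | some k2 =>
            rw [hs2, hp2] at IH2
            simp at IH2
            simp [hs2, hp2]
            push_cast at IH2 hA' ⊢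
            omega


theorem skip_signature_spec : Claim_equal_skip_signature := by
  intro signature idx _hdom hpre
  unfold Spec_skip_signature
  unfold Pre_skip_signature at hpre
  obtain ⟨⟨hge, hlt⟩, hsome⟩ := hpre
  obtain ⟨k, hk⟩ := Option.isSome_iff_exists.mp hsome
  have hB := (skipB_parse (((signature.toList.length : Int)) - idx).toNat
      signature.toList idx hge le_rfl).1
    (2 * (pvStream signature.toList idx).length + 2) (by omega)
  rw [hk] at hB
  have hT1 := skipA_alist (((signature.toList.length : Int)) - idx).toNat
    signature.toList idx [] hge le_rfl
  have hM := (alist_parse (pvStream signature.toList idx).length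
      (pvStream signature.toList idx) le_rfl).1
    (2 * (pvStream signature.toList idx).length + 2) k [] (by omega) hk
    (by intro x hx; cases hx)
  rw [hM] at hT1
  unfold resume at hT1
  rw [if_pos rfl] at hT1
  unfold skip_signature skip_signature_alt
  rw [hT1]
  cases hsb : skipB signature.toList idx with
  | none => rw [hsb] at hB; simp at hB
  | some r =>
    rw [hsb] at hB
    simp at hB
    simp [hB]
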